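-- pv_equiv track=rewrite | github.com/posl/comment_recommendation | script/split_gen/2_time/zh/256_D/6.py | solve
-- ===== SOURCE A (Python) =====
-- def solve(h1, h2, h3, w1, w2, w3):
--     from itertools import permutations
--     count = 0
--     for p in permutations(range(1, 10)):
--         if p[0] + p[1] + p[2] == h1 and p[3] + p[4] + p[5] == h2 and p[6] + p[7] + p[8] == h3:
--             if p[0] + p[3] + p[6] == w1 and p[1] + p[4] + p[7] == w2 and p[2] + p[5] + p[8] == w3:
--                 count += 1
--     return count
-- ===== SOURCE B (Python) =====
-- def solve(h1, h2, h3, w1, w2, w3):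
--     # Fix the four free cells a,b (row 1) and d,e (row 2); the sum constraints
--     # force the remaining five cells, so only 9^4 candidates are checked
--     # instead of 9! permutations.
--     from itertools import product
--     count = 0
--     for a, b, d, e in product(range(1, 10), repeat=4):
--         c = h1 - a - b
--         f = h2 - d - e
--         g = w1 - a - d
--         h = w2 - b - e
--         i = h3 - g - h
--         if c + f + i != w3:
--             continue
--         vals = (a, b, c, d, e, f, g, h, i)
--         if all(1 <= v <= 9 for v in vals) and len(set(vals)) == 9:
--             count += 1
--     return count
-- ===== Notes on version B (the rewrite author's own statement) =====
-- stated objective: faster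
-- what changed: Instead of scanning all 9! permutations, B enumerates only the four free cells (a,b,d,e) over 9^4 candidates and derives the other five cells from the row/column sum constraints, then checks range and distinctness.
import Mathlib
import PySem

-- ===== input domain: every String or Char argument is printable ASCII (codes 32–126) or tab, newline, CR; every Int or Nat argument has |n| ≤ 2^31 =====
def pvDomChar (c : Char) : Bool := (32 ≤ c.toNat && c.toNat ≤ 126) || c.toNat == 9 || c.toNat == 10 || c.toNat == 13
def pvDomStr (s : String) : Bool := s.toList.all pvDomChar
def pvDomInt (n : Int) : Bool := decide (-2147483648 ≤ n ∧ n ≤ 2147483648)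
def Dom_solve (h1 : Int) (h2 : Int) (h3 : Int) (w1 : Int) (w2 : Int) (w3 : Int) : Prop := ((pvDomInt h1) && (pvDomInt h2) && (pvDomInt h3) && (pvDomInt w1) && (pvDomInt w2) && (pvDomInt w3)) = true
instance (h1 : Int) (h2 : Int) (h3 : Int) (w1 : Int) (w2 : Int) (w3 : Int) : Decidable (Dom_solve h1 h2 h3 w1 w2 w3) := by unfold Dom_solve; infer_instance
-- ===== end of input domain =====

-- B enumerates only the four free cells (a,b,d,e) and derives the other five from the
-- row/column sums (9^4 candidates instead of 9! permutations) — objective: faster (constant factor).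

-- ===== PORT A =====
-- A's permutation test: rows h1,h2,h3 then columns w1,w2,w3 (two nested ifs in the Python).
def pvRowsOk (h1 h2 h3 : Int) (p : List Int) : Bool :=
  PySem.List.pyGetD p 0 0 + PySem.List.pyGetD p 1 0 + PySem.List.pyGetD p 2 0 == h1 &&
  PySem.List.pyGetD p 3 0 + PySem.List.pyGetD p 4 0 + PySem.List.pyGetD p 5 0 == h2 &&
  PySem.List.pyGetD p 6 0 + PySem.List.pyGetD p 7 0 + PySem.List.pyGetD p 8 0 == h3

def pvColsOk (w1 w2 w3 : Int) (p : List Int) : Bool :=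
  PySem.List.pyGetD p 0 0 + PySem.List.pyGetD p 3 0 + PySem.List.pyGetD p 6 0 == w1 &&
  PySem.List.pyGetD p 1 0 + PySem.List.pyGetD p 4 0 + PySem.List.pyGetD p 7 0 == w2 &&
  PySem.List.pyGetD p 2 0 + PySem.List.pyGetD p 5 0 + PySem.List.pyGetD p 8 0 == w3

def solve (h1 : Int) (h2 : Int) (h3 : Int) (w1 : Int) (w2 : Int) (w3 : Int) : Int :=
  (PySem.List.permutations (PySem.List.pyRange 1 10 1) (PySem.List.pyRange 1 10 1).length).foldl
    (fun count p =>
      if pvRowsOk h1 h2 h3 p then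
        if pvColsOk w1 w2 w3 p then count + 1 else count
      else count) 0

-- ===== PORT B =====
-- B's candidate test: derive c,f,g,h,i from the free cells, check the last column sum,
-- the 1..9 range and distinctness (len(set(vals)) == 9).
def pvQuadOk (h1 h2 h3 w1 w2 w3 : Int) (q : Int × Int × Int × Int) : Bool :=
  match q with
  | (a, b, d, e) =>
    let c := h1 - a - b
    let f := h2 - d - e
    let g := w1 - a - d
    let h := w2 - b - e
    let i := h3 - g - h
    if c + f + i != w3 then false
    else
      let vals : List Int := [a, b, c, d, e, f, g, h, i]
      (vals.all fun v => decide (1 ≤ v) && decide (v ≤ 9)) &&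
      PySem.Set.len (PySem.Set.ofList vals) == 9

def solve_alt (h1 : Int) (h2 : Int) (h3 : Int) (w1 : Int) (w2 : Int) (w3 : Int) : Int :=
  let r := PySem.List.pyRange 1 10 1
  (r.product (r.product (r.product r))).foldl
    (fun count q => if pvQuadOk h1 h2 h3 w1 w2 w3 q then count + 1 else count) 0

-- ===== PRECONDITION & SPEC =====
def Spec_solve (h1 : Int) (h2 : Int) (h3 : Int) (w1 : Int) (w2 : Int) (w3 : Int) (out : Int) : Prop := out = solve_alt h1 h2 h3 w1 w2 w3
instance (h1 : Int) (h2 : Int) (h3 : Int) (w1 : Int) (w2 : Int) (w3 : Int) (out : Int) : Decidable (Spec_solve h1 h2 h3 w1 w2 w3 out) := by unfold Spec_solve; infer_instance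

-- ===== CLAIM (what is proved, stated in full; the proofs are below) =====
def Claim_equal_solve : Prop := ∀ (h1 : Int) (h2 : Int) (h3 : Int) (w1 : Int) (w2 : Int) (w3 : Int), Dom_solve h1 h2 h3 w1 w2 w3 → Spec_solve h1 h2 h3 w1 w2 w3 (solve h1 h2 h3 w1 w2 w3)

-- ===== LEMMAS AND PROOFS =====

-- counting loop ↔ countP
lemma pv_foldl_count {α : Type} (P : α → Bool) : ∀ (l : List α) (c : Int),
    l.foldl (fun c x => if P x then c + 1 else c) c = c + l.countP P := by
  intro l
  induction l with
  | nil => intro c; simp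
  | cons x t ih =>
    intro c
    by_cases h : P x = true <;> simp [h, ih] <;> ring

-- A's nested ifs are one conjunction
lemma pv_foldl_count2 {α : Type} (P Q : α → Bool) (l : List α) :
    l.foldl (fun c x => if P x then if Q x then c + 1 else c else c) 0
      = (l.countP (fun x => P x && Q x) : Int) := by
  have : (fun (c : Int) (x : α) => if P x then if Q x then c + 1 else c else c)
      = fun c x => if (P x && Q x) then c + 1 else c := by
    funext c x
    by_cases hp : P x = true <;> by_cases hq : Q x = true <;> simp [hp, hq]
  rw [this, pv_foldl_count]
  simp

-- the shared 1..9 range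
lemma pv_range9 : PySem.List.pyRange 1 10 1 = [1, 2, 3, 4, 5, 6, 7, 8, 9] := by decide

-- every permutation of a list is produced by PySem.List.permutations at full length
lemma pv_mem_permutations_of_perm {α : Type} [DecidableEq α] :
    ∀ (p xs : List α), p.Perm xs → p ∈ PySem.List.permutations xs xs.length := by
  intro p
  induction p with
  | nil =>
    intro xs h
    have : xs = [] := (List.Perm.nil_eq h).symm
    subst this
    simp [PySem.List.permutations_zero]
  | cons x t ih =>
    intro xs h
    have hx : x ∈ xs := h.mem_iff.mp (List.mem_cons_self)
    have hlen : xs.length = t.length + 1 := by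
      have := h.length_eq; simpa using this.symm
    rw [hlen, PySem.List.permutations_succ]
    have hidx : xs.idxOf x < xs.length := List.idxOf_lt_length_of_mem hx
    refine List.mem_flatMap.mpr ⟨xs.idxOf x, ?_, ?_⟩
    · exact List.mem_range.mpr hidx
    have hget : xs[xs.idxOf x]? = some x := by
      rw [List.getElem?_eq_getElem hidx, List.getElem_idxOf]
    rw [hget]
    simp only [List.mem_map]
    refine ⟨t, ?_, rfl⟩
    have herase : xs.erase x = xs.eraseIdx (xs.idxOf x) := List.erase_eq_eraseIdx_of_idxOf rfl
    have hperm : t.Perm (xs.eraseIdx (xs.idxOf x)) := by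
      have h1 : xs.Perm (x :: xs.erase x) := List.perm_cons_erase hx
      have h2 : (x :: t).Perm (x :: xs.erase x) := h.trans h1
      have h3 : t.Perm (xs.erase x) := (List.perm_cons x).mp h2
      rwa [herase] at h3
    have hlen2 : (xs.eraseIdx (xs.idxOf x)).length = t.length := by
      rw [List.length_eraseIdx_of_lt hidx, hlen]; omega
    rw [← hlen2]
    exact ih _ hperm

-- PySem.List.permutations of a duplicate-free list is duplicate-free
lemma pv_nodup_permutations {α : Type} :
    ∀ (r : ℕ) (xs : List α), xs.Nodup → (PySem.List.permutations xs r).Nodup := by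
  intro r
  induction r with
  | zero => intro xs _; simp [PySem.List.permutations_zero]
  | succ n ih =>
    intro xs hnd
    rw [PySem.List.permutations_succ]
    rw [List.nodup_flatMap]
    constructor
    · intro i hi
      rcases hget : xs[i]? with _ | x
      · simp
      · exact (ih _ (hnd.eraseIdx i)).map (fun p q hpq => by simpa using hpq)
    · rw [List.pairwise_iff_getElem]
      intro i j hi hj hij
      simp only [List.getElem_range]
      have hi' : i < xs.length := by simpa using hi
      have hj' : j < xs.length := by simpa using hj
      rw [Function.onFun]
      rw [List.getElem?_eq_getElem hi', List.getElem?_eq_getElem hj']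
      intro l hl1 hl2
      simp only [List.mem_map] at hl1 hl2
      obtain ⟨p, _, rfl⟩ := hl1
      obtain ⟨q, _, heq⟩ := hl2
      have : xs[j] = xs[i] := by
        have := heq
        simp at this
        exact this.1
      have hji : j = i := by
        have h2 := (List.Nodup.getElem_inj_iff hnd).mp this
        omega
      omega

lemma pv_nodup_of_ofList_length {α : Type} [BEq α] [LawfulBEq α] :
    ∀ (xs : List α), (PySem.Set.ofList xs).length = xs.length → xs.Nodup := by
  intro xs
  induction xs with
  | nil => intro _; simp
  | cons x t ih =>
    intro h
    rw [PySem.Set.ofList_cons] at h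
    simp only [List.length_cons] at h
    have hle1 : ((PySem.Set.ofList t).discard x).length ≤ (PySem.Set.ofList t).length :=
      List.length_filter_le _ _
    have hle2 : (PySem.Set.ofList t).length ≤ t.length := PySem.Set.length_ofList_le t
    have hlen : (PySem.Set.ofList t).length = t.length := by omega
    have hdisc : ((PySem.Set.ofList t).discard x).length = (PySem.Set.ofList t).length := by omega
    have hnd := ih hlen
    have hnotmem : x ∉ t := by
      intro hmem
      have hmem' : x ∈ PySem.Set.ofList t := by rw [PySem.Set.mem_ofList]; exact hmem
      have : ((PySem.Set.ofList t).discard x).length < (PySem.Set.ofList t).length := by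
        apply List.length_filter_lt_length_iff_exists.mpr
        exact ⟨x, hmem', by simp⟩
      omega
    exact List.nodup_cons.mpr ⟨hnotmem, hnd⟩

-- decompose a 9-element list
lemma pv_len9 (p : List Int) (h : p.length = 9) :
    ∃ a b c d e f g i j, p = [a, b, c, d, e, f, g, i, j] := by
  match p, h with
  | [a, b, c, d, e, f, g, i, j], _ => exact ⟨a, b, c, d, e, f, g, i, j, rfl⟩

-- nine distinct values in 1..9 are a permutation of [1..9]
lemma pv_perm_of_nodup_range (p : List Int) (hlen : p.length = 9) (hnd : p.Nodup)
    (hmem : ∀ x ∈ p, 1 ≤ x ∧ x ≤ 9) : p.Perm [1, 2, 3, 4, 5, 6, 7, 8, 9] := by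
  have hnd9 : ([1, 2, 3, 4, 5, 6, 7, 8, 9] : List Int).Nodup := by decide
  apply List.perm_of_nodup_nodup_toFinset_eq hnd hnd9
  apply Finset.eq_of_subset_of_card_le
  · intro x hx
    rw [List.mem_toFinset] at hx ⊢
    have := hmem x hx
    have h1 := this.1; have h2 := this.2
    interval_cases x <;> simp
  · rw [List.toFinset_card_of_nodup hnd9, List.toFinset_card_of_nodup hnd]
    simp [hlen]

lemma pv_g0 (a b c d e f g i j : Int) : PySem.List.pyGetD [a,b,c,d,e,f,g,i,j] 0 0 = a := by simp [pysem]
lemma pv_g1 (a b c d e f g i j : Int) : PySem.List.pyGetD [a,b,c,d,e,f,g,i,j] 1 0 = b := by simp [pysem]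
lemma pv_g2 (a b c d e f g i j : Int) : PySem.List.pyGetD [a,b,c,d,e,f,g,i,j] 2 0 = c := by simp [pysem]
lemma pv_g3 (a b c d e f g i j : Int) : PySem.List.pyGetD [a,b,c,d,e,f,g,i,j] 3 0 = d := by simp [pysem]
lemma pv_g4 (a b c d e f g i j : Int) : PySem.List.pyGetD [a,b,c,d,e,f,g,i,j] 4 0 = e := by simp [pysem]
lemma pv_g5 (a b c d e f g i j : Int) : PySem.List.pyGetD [a,b,c,d,e,f,g,i,j] 5 0 = f := by simp [pysem]
lemma pv_g6 (a b c d e f g i j : Int) : PySem.List.pyGetD [a,b,c,d,e,f,g,i,j] 6 0 = g := by simp [pysem]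
lemma pv_g7 (a b c d e f g i j : Int) : PySem.List.pyGetD [a,b,c,d,e,f,g,i,j] 7 0 = i := by simp [pysem]
lemma pv_g8 (a b c d e f g i j : Int) : PySem.List.pyGetD [a,b,c,d,e,f,g,i,j] 8 0 = j := by simp [pysem]

-- membership in the 1..9 literal range
lemma pv_mem9 (x : Int) : x ∈ ([1,2,3,4,5,6,7,8,9] : List Int) ↔ 1 ≤ x ∧ x ≤ 9 := by
  constructor
  · intro h; fin_cases h <;> norm_num
  · rintro ⟨hl, hr⟩; interval_cases x <;> simp

-- the main counting identity, as a Finset bijection between accepted permutations and accepted quadruples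
lemma pv_count_eq (h1 h2 h3 w1 w2 w3 : Int) :
    (PySem.List.permutations ([1,2,3,4,5,6,7,8,9] : List Int) 9).countP
        (fun p => pvRowsOk h1 h2 h3 p && pvColsOk w1 w2 w3 p)
      = (([1,2,3,4,5,6,7,8,9] : List Int).product (([1,2,3,4,5,6,7,8,9] : List Int).product
          (([1,2,3,4,5,6,7,8,9] : List Int).product ([1,2,3,4,5,6,7,8,9] : List Int)))).countP
          (pvQuadOk h1 h2 h3 w1 w2 w3) := by
  have hnd9 : ([1,2,3,4,5,6,7,8,9] : List Int).Nodup := by decide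
  have hndP : (PySem.List.permutations ([1,2,3,4,5,6,7,8,9] : List Int) 9).Nodup :=
    pv_nodup_permutations 9 _ hnd9
  have hndQ : (([1,2,3,4,5,6,7,8,9] : List Int).product (([1,2,3,4,5,6,7,8,9] : List Int).product
      (([1,2,3,4,5,6,7,8,9] : List Int).product ([1,2,3,4,5,6,7,8,9] : List Int)))).Nodup :=
    List.Nodup.product hnd9 (List.Nodup.product hnd9 (List.Nodup.product hnd9 hnd9))
  rw [List.countP_eq_length_filter, List.countP_eq_length_filter]
  rw [← List.toFinset_card_of_nodup (List.Nodup.filter _ hndP),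
      ← List.toFinset_card_of_nodup (List.Nodup.filter _ hndQ)]
  apply Finset.card_bij (fun p _ => (PySem.List.pyGetD p 0 0, PySem.List.pyGetD p 1 0,
    PySem.List.pyGetD p 3 0, PySem.List.pyGetD p 4 0))
  · -- maps into accepted quadruples
    intro p hp
    rw [List.mem_toFinset, List.mem_filter] at hp
    obtain ⟨hmem, hP⟩ := hp
    have hperm : p.Perm ([1,2,3,4,5,6,7,8,9] : List Int) :=
      PySem.List.perm_of_mem_permutations hmem
    have hlen : p.length = 9 := by simpa using hperm.length_eq
    obtain ⟨a, b, c, d, e, f, g, i, j, rfl⟩ := pv_len9 p hlen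
    have hin : ∀ x ∈ ([a,b,c,d,e,f,g,i,j] : List Int), 1 ≤ x ∧ x ≤ 9 :=
      fun x hx => (pv_mem9 x).mp (hperm.subset hx)
    have hnd : ([a,b,c,d,e,f,g,i,j] : List Int).Nodup := hperm.nodup_iff.mpr hnd9
    simp only [pvRowsOk, pvColsOk, Bool.and_eq_true, beq_iff_eq] at hP
    simp only [pv_g0, pv_g1, pv_g2, pv_g3, pv_g4, pv_g5, pv_g6, pv_g7, pv_g8] at hP
    rw [List.mem_toFinset, List.mem_filter]
    constructor
    · simp only [pv_g0, pv_g1, pv_g3, pv_g4]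
      rw [List.pair_mem_product, List.pair_mem_product, List.pair_mem_product]
      exact ⟨(pv_mem9 a).mpr (hin a (by simp)), (pv_mem9 b).mpr (hin b (by simp)),
        (pv_mem9 d).mpr (hin d (by simp)), (pv_mem9 e).mpr (hin e (by simp))⟩
    · simp only [pv_g0, pv_g1, pv_g3, pv_g4, pvQuadOk]
      have hc : h1 - a - b = c := by omega
      have hf : h2 - d - e = f := by omega
      have hg : w1 - a - d = g := by omega
      have hi : w2 - b - e = i := by omega
      have hj : h3 - g - i = j := by omega
      rw [hc, hf, hg, hi, hj]
      have hw3 : ¬ (c + f + j ≠ w3) := by omega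
      rw [if_neg (show ¬ ((c + f + j != w3) = true) by simpa using hw3)]
      rw [Bool.and_eq_true, List.all_eq_true]
      constructor
      · intro v hv
        have := hin v hv
        simp [this.1, this.2]
      · rw [PySem.Set.ofList_eq_self_of_nodup _ hnd, PySem.Set.len_eq]
        simp
  · -- injective
    intro p1 hp1 p2 hp2 heq
    rw [List.mem_toFinset, List.mem_filter] at hp1 hp2
    have hperm1 : p1.Perm ([1,2,3,4,5,6,7,8,9] : List Int) :=
      PySem.List.perm_of_mem_permutations hp1.1
    have hperm2 : p2.Perm ([1,2,3,4,5,6,7,8,9] : List Int) :=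
      PySem.List.perm_of_mem_permutations hp2.1
    obtain ⟨a, b, c, d, e, f, g, i, j, rfl⟩ := pv_len9 p1 (by simpa using hperm1.length_eq)
    obtain ⟨a', b', c', d', e', f', g', i', j', rfl⟩ := pv_len9 p2 (by simpa using hperm2.length_eq)
    have hP1 := hp1.2; have hP2 := hp2.2
    simp only [pvRowsOk, pvColsOk, Bool.and_eq_true, beq_iff_eq] at hP1 hP2
    simp only [pv_g0, pv_g1, pv_g2, pv_g3, pv_g4, pv_g5, pv_g6, pv_g7, pv_g8] at hP1 hP2
    simp only [pv_g0, pv_g1, pv_g3, pv_g4, Prod.mk.injEq] at heq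
    obtain ⟨ha, hb, hd, he⟩ := heq
    have : c = c' ∧ f = f' ∧ g = g' ∧ i = i' ∧ j = j' := by
      refine ⟨by omega, by omega, by omega, by omega, by omega⟩
    obtain ⟨hc, hf, hg, hi, hj⟩ := this
    rw [ha, hb, hc, hd, he, hf, hg, hi, hj]
  · -- surjective
    rintro ⟨a, b, d, e⟩ hq
    rw [List.mem_toFinset, List.mem_filter] at hq
    obtain ⟨hmemq, hQ⟩ := hq
    rw [List.pair_mem_product, List.pair_mem_product, List.pair_mem_product] at hmemq
    obtain ⟨ha, hb, hd, he⟩ := hmemq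
    simp only [pvQuadOk] at hQ
    by_cases hw : h1 - a - b + (h2 - d - e) + (h3 - (w1 - a - d) - (w2 - b - e)) = w3
    swap
    · rw [if_pos (by simpa using hw)] at hQ; exact absurd hQ (by simp)
    rw [if_neg (by simpa using hw)] at hQ
    rw [Bool.and_eq_true, List.all_eq_true] at hQ
    obtain ⟨hall, hlen9⟩ := hQ
    set vals : List Int := [a, b, h1 - a - b, d, e, h2 - d - e, w1 - a - d, w2 - b - e,
      h3 - (w1 - a - d) - (w2 - b - e)] with hvals
    have hlen' : (PySem.Set.ofList vals).length = 9 := by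
      rw [PySem.Set.len_eq] at hlen9
      exact_mod_cast (beq_iff_eq.mp hlen9)
    have hnd : vals.Nodup := pv_nodup_of_ofList_length vals (by rw [hlen']; rfl)
    have hrange : ∀ x ∈ vals, 1 ≤ x ∧ x ≤ 9 := by
      intro x hx
      have := hall x hx
      simp only [Bool.and_eq_true, decide_eq_true_eq] at this
      exact this
    have hperm : vals.Perm ([1,2,3,4,5,6,7,8,9] : List Int) :=
      pv_perm_of_nodup_range vals rfl hnd hrange
    refine ⟨vals, ?_, ?_⟩
    · rw [List.mem_toFinset, List.mem_filter]
      refine ⟨pv_mem_permutations_of_perm vals _ hperm, ?_⟩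
      simp only [pvRowsOk, pvColsOk, Bool.and_eq_true, beq_iff_eq, hvals]
      simp only [pv_g0, pv_g1, pv_g2, pv_g3, pv_g4, pv_g5, pv_g6, pv_g7, pv_g8]
      omega
    · simp only [hvals, pv_g0, pv_g1, pv_g3, pv_g4]

-- ===== VERDICT (by name: the statement is the Claim_ definition above) =====
theorem solve_spec : Claim_equal_solve := by
  intro h1 h2 h3 w1 w2 w3 _
  unfold Spec_solve solve solve_alt
  rw [pv_foldl_count2, pv_foldl_count]
  simp only [pv_range9]
  rw [show ([1,2,3,4,5,6,7,8,9] : List Int).length = 9 from rfl]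
  rw [pv_count_eq]
  omega
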